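-- pv_equiv track=rewrite | github.com/EcoFriendlyAppleSu/algo | level01/Level01_02.py | solution
-- ===== SOURCE A (Python) =====
-- def solution(lottos, win_nums):
--     hit = 0
--     hasZero = 0
--     rank = 7
--     answer = []
--     lottos = sorted(lottos)
--     win_nums = sorted(win_nums)
--
--     for i in lottos:
--         if i in win_nums:
--             hit += 1
--         elif i == 0:
--             hasZero += 1
--
--     if hit > 0 or hasZero > 0:
--         answer.append(rank - hit - hasZero)
--     else:
--         answer.append(6)
--
--     if hit == 0:
--         answer.append(6)
--     else:
--         answer.append(rank - hit)
--
--     return sorted(answer)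
-- ===== SOURCE B (Python) =====
-- def solution(lottos, win_nums):
--     # Build a multiplicity index of lottos once, then traverse the WIN numbers
--     # (each distinct one once) instead of scanning lottos against win_nums.
--     cnt = {}
--     for n in lottos:
--         cnt[n] = cnt.get(n, 0) + 1
--     hit = 0
--     seen = set()
--     for v in win_nums:
--         if v not in seen:
--             seen.add(v)
--             hit += cnt.get(v, 0)
--     zeros = 0 if 0 in seen else cnt.get(0, 0)
--     best = 7 - hit - zeros if hit + zeros > 0 else 6
--     worst = 7 - hit if hit > 0 else 6
--     return [min(best, worst), max(best, worst)]
-- ===== Notes on version B (the rewrite author's own statement) =====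
-- stated objective: faster
-- what changed: B reverses the traversal: instead of sorting both lists and scanning lottos with a linear 'in win_nums' membership test per element, it builds a multiplicity dict of lottos once, then iterates over the distinct win numbers accumulating their multiplicities (hit), reads the zero count from the dict, and emits the ordered pair via min/max with no sorting anywhere.
import Mathlib
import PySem

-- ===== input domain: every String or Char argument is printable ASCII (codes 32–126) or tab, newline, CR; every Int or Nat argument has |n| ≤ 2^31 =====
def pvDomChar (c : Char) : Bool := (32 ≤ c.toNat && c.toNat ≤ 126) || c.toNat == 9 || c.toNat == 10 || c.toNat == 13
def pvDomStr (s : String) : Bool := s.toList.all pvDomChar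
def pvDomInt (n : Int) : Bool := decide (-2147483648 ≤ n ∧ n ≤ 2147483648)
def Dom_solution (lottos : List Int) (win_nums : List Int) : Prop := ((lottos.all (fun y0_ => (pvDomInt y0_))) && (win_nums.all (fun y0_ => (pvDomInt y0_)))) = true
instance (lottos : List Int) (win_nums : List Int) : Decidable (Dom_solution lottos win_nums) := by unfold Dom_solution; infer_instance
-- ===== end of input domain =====

-- B builds a multiplicity dict of lottos and iterates the distinct win numbers instead of sorting both lists and scanning lottos with a per-element membership test (objective: faster).


-- ===== PORT A =====
def solution (lottos : List Int) (win_nums : List Int) : List Int :=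
  let lottos' := PySem.List.sorted lottos (fun x => x) false
  let win' := PySem.List.sorted win_nums (fun x => x) false
  let st := lottos'.foldl (fun (p : Int × Int) i =>
      if i ∈ win' then (p.1 + 1, p.2)
      else if i = 0 then (p.1, p.2 + 1) else p) ((0 : Int), (0 : Int))
  let hit := st.1
  let hasZero := st.2
  let a1 : Int := if hit > 0 ∨ hasZero > 0 then 7 - hit - hasZero else 6
  let a2 : Int := if hit = 0 then 6 else 7 - hit
  PySem.List.sorted [a1, a2] (fun x => x) false

-- ===== PORT B =====
def solution_alt (lottos : List Int) (win_nums : List Int) : List Int :=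
  let cnt : PySem.Dict Int Int := lottos.foldl (fun d n => d.insert n (d.getD n 0 + 1)) PySem.Dict.empty
  let st := win_nums.foldl (fun (p : PySem.Set Int × Int) v =>
      if PySem.Set.contains p.1 v then p
      else (PySem.Set.add p.1 v, p.2 + cnt.getD v 0)) (PySem.Set.empty, (0 : Int))
  let seen := st.1
  let hit := st.2
  let zeros : Int := if PySem.Set.contains seen 0 then 0 else cnt.getD 0 0
  let best : Int := if hit + zeros > 0 then 7 - hit - zeros else 6
  let worst : Int := if hit > 0 then 7 - hit else 6
  [min best worst, max best worst]

-- ===== PRECONDITION & SPEC =====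
def Spec_solution (lottos : List Int) (win_nums : List Int) (out : List Int) : Prop := out = solution_alt lottos win_nums
instance (lottos : List Int) (win_nums : List Int) (out : List Int) : Decidable (Spec_solution lottos win_nums out) := by unfold Spec_solution; infer_instance

-- ===== CLAIM (what is proved, stated in full; the proofs are below) =====
def Claim_equal_solution : Prop := ∀ (lottos : List Int) (win_nums : List Int), Dom_solution lottos win_nums → Spec_solution lottos win_nums (solution lottos win_nums)

-- ===== LEMMAS AND PROOFS =====

-- A's counting loop computes its two counters in closed form.
lemma pvFoldA (wn : List Int) (xs : List Int) (a b : Int) :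
    xs.foldl (fun (p : Int × Int) i =>
      if i ∈ wn then (p.1 + 1, p.2)
      else if i = 0 then (p.1, p.2 + 1) else p) (a, b)
    = (a + (xs.countP (fun i => decide (i ∈ wn)) : Int),
       b + (xs.countP (fun i => decide (i ∉ wn ∧ i = 0)) : Int)) := by
  induction xs generalizing a b with
  | nil => simp
  | cons x t ih =>
    simp only [List.foldl_cons]
    by_cases hx : x ∈ wn
    · rw [if_pos hx, ih]
      simp [hx, Prod.ext_iff]; omega
    · by_cases h0 : x = 0
      · subst h0
        rw [if_neg hx, if_pos rfl, ih]
        simp [hx, Prod.ext_iff]; omega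
      · rw [if_neg hx, if_neg h0, ih]
        simp [hx, h0]

-- Splitting the membership count at a fresh value v.
lemma pvCountSplit (l : List Int) (v : Int) (t : List Int) (seen : List Int) (hv : v ∉ seen) :
    l.countP (fun x => decide (x ∈ (v :: t) ∧ x ∉ seen))
    = l.count v + l.countP (fun x => decide (x ∈ t ∧ ¬(x ∈ seen ∨ x = v))) := by
  induction l with
  | nil => simp
  | cons a l ih =>
    simp only [List.countP_cons, List.count_cons, ih]
    by_cases hav : a = v <;> by_cases has : a ∈ seen <;> by_cases hat : a ∈ t <;>
      simp [hav, has, hat, hv] <;> omega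

-- B's loop over the win numbers: the seen-set collects them and hit accumulates
-- the multiplicity in l of each newly seen value.
lemma pvLoopB (l : List Int) (wn : List Int) (seen : PySem.Set Int) (h : Int) :
    wn.foldl (fun (p : PySem.Set Int × Int) v =>
      if PySem.Set.contains p.1 v then p
      else (PySem.Set.add p.1 v, p.2 + (l.count v : Int))) (seen, h)
    = (PySem.Set.update seen wn,
       h + (l.countP (fun x => decide (x ∈ wn ∧ x ∉ seen)) : Int)) := by
  induction wn generalizing seen h with
  | nil => simp [PySem.Set.update]
  | cons v t ih =>
    simp only [List.foldl_cons, PySem.Set.update_cons]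
    by_cases hv : v ∈ seen
    · rw [if_pos ((PySem.Set.contains_iff _ _).2 hv)]
      have hadd : PySem.Set.add seen v = seen := by
        simp [PySem.Set.add, hv]
      have hcp : l.countP (fun x => decide (x ∈ (v :: t) ∧ x ∉ seen))
               = l.countP (fun x => decide (x ∈ t ∧ x ∉ seen)) := by
        apply List.countP_congr
        intro x _
        by_cases hx : x = v <;> simp [hx, hv]
      rw [ih, hadd, hcp]
    · rw [if_neg (by simp [hv]), ih]
      refine Prod.ext rfl ?_
      simp only
      rw [pvCountSplit l v t seen hv]
      have hcp : l.countP (fun x => decide (x ∈ t ∧ x ∉ PySem.Set.add seen v))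
           = l.countP (fun x => decide (x ∈ t ∧ ¬(x ∈ seen ∨ x = v))) := by
        apply List.countP_congr
        intro x _
        simp [PySem.Set.mem_add]
      rw [hcp]
      push_cast
      ring

-- Two-element sort is the ordered pair.
lemma pvSortedPair (a b : Int) :
    PySem.List.sorted [a, b] (fun x => x) false = if a ≤ b then [a, b] else [b, a] := by
  split_ifs with h
  · exact PySem.List.sorted_id_eq_of_perm_of_pairwise _ _ (List.Perm.refl _) (by simp [h])
  · exact PySem.List.sorted_id_eq_of_perm_of_pairwise _ _ (List.Perm.swap _ _ _) (by simp; omega)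

-- ===== VERDICT (by name: the statement is the Claim_ definition above) =====
theorem solution_spec : Claim_equal_solution := by
  intro lottos win_nums _
  unfold Spec_solution solution solution_alt
  simp only [PySem.Dict.getD_foldl_insert_add_one, PySem.Dict.getD_empty, zero_add]
  rw [pvFoldA]
  have hB := pvLoopB lottos win_nums PySem.Set.empty 0
  simp only [zero_add] at hB
  rw [hB]
  -- transfer A's counts over the sorts
  have hhit : ((PySem.List.sorted lottos (fun x => x) false).countP
      (fun i => decide (i ∈ PySem.List.sorted win_nums (fun x => x) false)))
      = lottos.countP (fun i => decide (i ∈ win_nums)) := by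
    rw [List.Perm.countP_eq _ (PySem.List.sorted_perm lottos (fun x => x) false)]
    exact List.countP_congr (fun x _ => by simp [PySem.List.mem_sorted])
  have hzero : ((PySem.List.sorted lottos (fun x => x) false).countP
      (fun i => decide (i ∉ PySem.List.sorted win_nums (fun x => x) false ∧ i = 0)))
      = lottos.countP (fun i => decide (i ∉ win_nums ∧ i = 0)) := by
    rw [List.Perm.countP_eq _ (PySem.List.sorted_perm lottos (fun x => x) false)]
    exact List.countP_congr (fun x _ => by simp [PySem.List.mem_sorted])
  have hBhit : lottos.countP (fun x => decide (x ∈ win_nums ∧ x ∉ (PySem.Set.empty : PySem.Set Int)))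
      = lottos.countP (fun i => decide (i ∈ win_nums)) := by
    exact List.countP_congr (fun x _ => by simp [PySem.Set.empty])
  rw [hhit, hzero, hBhit, pvSortedPair]
  have hseen : PySem.Set.contains (PySem.Set.update (PySem.Set.empty : PySem.Set Int) win_nums) 0
      = decide ((0 : Int) ∈ win_nums) := by
    by_cases h0 : (0 : Int) ∈ win_nums
    · simp [h0, PySem.Set.mem_update, PySem.Set.empty]
    · simp [h0, PySem.Set.mem_update, PySem.Set.empty]
  rw [hseen]
  by_cases h0w : (0 : Int) ∈ win_nums
  · have hz : lottos.countP (fun i => decide (i ∉ win_nums ∧ i = 0)) = 0 := by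
      rw [List.countP_eq_zero]
      intro x _ hx
      simp at hx
      exact absurd h0w (hx.2 ▸ hx.1)
    rw [hz]
    simp only [h0w, decide_true, if_pos]
    generalize lottos.countP (fun i => decide (i ∈ win_nums)) = h
    split_ifs <;> simp_all
  · have hz : lottos.countP (fun i => decide (i ∉ win_nums ∧ i = 0)) = lottos.count 0 := by
      rw [List.count_eq_countP]
      exact List.countP_congr (fun x _ => by by_cases hx : x = 0 <;> simp [hx, h0w])
    rw [hz]
    simp only [h0w, decide_false, Bool.false_eq_true, if_false]
    generalize lottos.countP (fun i => decide (i ∈ win_nums)) = h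
    generalize lottos.count 0 = z
    split_ifs <;> first
      | (simp_all [min_def, max_def]; omega)
      | simp_all [min_def, max_def]
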